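-- pv_equiv track=rewrite | github.com/YT-Scripting/formatscripts | echobackbot.py | modify_text
-- ===== SOURCE A (Python) =====
-- def  modify_text(text: str)-> str:
--     text = text.replace('*', '**')
--     text = text.replace('#','###')
--
--     lines = text.split('\n')
--     formatted_lines = []
--     for i, line in enumerate(lines):
--         if i % 10 == 0:
--             time_stamp = f"{i//10 + 1}:00"
--             formatted_lines.append(time_stamp + ' ' + line)
--         else:
--             formatted_lines.append(line)
--     modified_text = '\n'.join(formatted_lines)
--     return modified_text
-- ===== SOURCE B (Python) =====
-- def modify_text(text: str) -> str:
--     text = text.replace('*', '**').replace('#', '###')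
--     lines = text.split('\n')
--     blocks = ['%d:00 %s' % (m + 1, '\n'.join(lines[10 * m:10 * m + 10]))
--               for m in range((len(lines) + 9) // 10)]
--     return '\n'.join(blocks)
-- ===== Notes on version B (the rewrite author's own statement) =====
-- stated objective: alternative
-- what changed: Instead of enumerating every line with an i%10==0 branch, B partitions the line list into 10-line blocks, renders each block as a single string by prefixing the minute stamp to the joined block, and joins the blocks; no per-line conditional or per-line stamping decision exists in B.
import Mathlib
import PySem

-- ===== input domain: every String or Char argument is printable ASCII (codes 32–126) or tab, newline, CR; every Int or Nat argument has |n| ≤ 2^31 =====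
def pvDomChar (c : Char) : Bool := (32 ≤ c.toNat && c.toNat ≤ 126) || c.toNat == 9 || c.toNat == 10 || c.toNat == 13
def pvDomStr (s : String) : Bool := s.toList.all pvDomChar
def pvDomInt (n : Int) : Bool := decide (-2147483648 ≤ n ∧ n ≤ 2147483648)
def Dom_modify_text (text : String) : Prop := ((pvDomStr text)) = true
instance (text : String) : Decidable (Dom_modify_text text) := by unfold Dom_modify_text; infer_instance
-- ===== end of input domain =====

-- B partitions the lines into 10-line blocks and renders each block as one stamped string,
-- joining the blocks — no per-line i%10 branch; same output (alternative decomposition).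

-- ===== PORT A =====
def modify_text (text : String) : String :=
  let text := PySem.Str.replace text "*" "**"
  let text := PySem.Str.replace text "#" "###"
  let lines := (PySem.Str.split? text "\n").getD []
  let formatted_lines := (PySem.List.enumerate lines 0).foldl
    (fun acc p =>
      if PySem.Int.mod p.1 10 == 0 then
        let time_stamp := PySem.Int.toStr (PySem.Int.floordiv p.1 10 + 1) ++ ":00"
        acc ++ [time_stamp ++ " " ++ p.2]
      else
        acc ++ [p.2]) []
  PySem.Str.join "\n" formatted_lines

-- ===== PORT B =====
def modify_text_alt (text : String) : String :=
  let text := PySem.Str.replace text "*" "**"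
  let text := PySem.Str.replace text "#" "###"
  let lines := (PySem.Str.split? text "\n").getD []
  let blocks := (PySem.List.pyRange 0 (PySem.Int.floordiv (PySem.List.len lines + 9) 10) 1).map
    (fun m => PySem.Int.toStr (m + 1) ++ ":00 " ++
      PySem.Str.join "\n" (PySem.List.slice lines (some (10 * m)) (some (10 * m + 10))))
  PySem.Str.join "\n" blocks

-- ===== PRECONDITION & SPEC =====
def Spec_modify_text (text : String) (out : String) : Prop := out = modify_text_alt text
instance (text : String) (out : String) : Decidable (Spec_modify_text text out) := by unfold Spec_modify_text; infer_instance

-- ===== CLAIM (what is proved, stated in full; the proofs are below) =====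
def Claim_equal_modify_text : Prop := ∀ (text : String), Dom_modify_text text → Spec_modify_text text (modify_text text)

-- ===== LEMMAS AND PROOFS =====

-- A's per-line transformation (string level).
def pvStampA (i : Int) (l : String) : String :=
  if PySem.Int.mod i 10 == 0 then
    PySem.Int.toStr (PySem.Int.floordiv i 10 + 1) ++ ":00" ++ " " ++ l
  else l

-- A's loop is a mapIdx.
lemma pvA_list (ls : List String) :
    (PySem.List.enumerate ls 0).foldl
      (fun acc p =>
        if PySem.Int.mod p.1 10 == 0 then
          acc ++ [PySem.Int.toStr (PySem.Int.floordiv p.1 10 + 1) ++ ":00" ++ " " ++ p.2]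
        else acc ++ [p.2]) []
    = ls.mapIdx (fun k l => pvStampA (k : Int) l) := by
  have h1 : (PySem.List.enumerate ls 0).foldl
      (fun acc p =>
        if PySem.Int.mod p.1 10 == 0 then
          acc ++ [PySem.Int.toStr (PySem.Int.floordiv p.1 10 + 1) ++ ":00" ++ " " ++ p.2]
        else acc ++ [p.2]) []
      = (PySem.List.enumerate ls 0).foldl
          (fun acc p => acc ++ [pvStampA p.1 p.2]) [] := by
    apply PySem.List.foldl_congr_mem
    intro acc p _
    unfold pvStampA
    by_cases h : (PySem.Int.mod p.1 10 == 0) = true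
    · rw [if_pos h, if_pos h]
    · rw [if_neg h, if_neg h]
  rw [h1, PySem.List.foldl_append_singleton_eq_map]
  apply List.ext_getElem
  · simp [PySem.List.length_enumerate]
  · intro k h1 h2
    simp [PySem.List.getElem_enumerate]

-- Char-level timestamp prefix for minute index m (0-based).
def pvPfx (m : Nat) : List Char := PySem.Int.toChars ((m : Int) + 1) ++ (":00 ").toList

-- Char-level per-line stamping with minute offset m.
def pvStampC (m k : Nat) (l : List Char) : List Char :=
  if k % 10 = 0 then pvPfx (m + k / 10) ++ l else l

-- Char-level block list of B, with minute offset m.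
def pvBlocks (m : Nat) (cs : List (List Char)) : List (List Char) :=
  (List.range ((cs.length + 9) / 10)).map
    (fun j => pvPfx (m + j) ++ PySem.Chars.join ['\n'] ((cs.drop (10 * j)).take 10))

-- join distributes over a prefix on the first piece.
lemma pvJoin_prefix (sep p h : List Char) (rest : List (List Char)) :
    PySem.Chars.join sep ((p ++ h) :: rest) = p ++ PySem.Chars.join sep (h :: rest) := by
  cases rest with
  | nil => simp [PySem.Chars.join_singleton]
  | cons q r => rw [PySem.Chars.join_cons_cons, PySem.Chars.join_cons_cons]; simp

-- join over an append of two nonempty piece lists.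
lemma pvJoin_append (sep : List Char) :
    ∀ (xs ys : List (List Char)), xs ≠ [] → ys ≠ [] →
    PySem.Chars.join sep (xs ++ ys)
      = PySem.Chars.join sep xs ++ sep ++ PySem.Chars.join sep ys := by
  intro xs
  induction xs with
  | nil => intro ys h _; exact absurd rfl h
  | cons x xs ih =>
    intro ys _ hys
    cases xs with
    | nil =>
      cases ys with
      | nil => exact absurd rfl hys
      | cons y ys' => simp [PySem.Chars.join_singleton, PySem.Chars.join_cons_cons]
    | cons x2 xs' =>
      rw [List.cons_append, List.cons_append, PySem.Chars.join_cons_cons,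
        ← List.cons_append, PySem.Chars.join_cons_cons,
        ih ys (by simp) hys]
      simp

-- Within one block (≤ 10 lines) only the first line is stamped.
lemma pvStamp_block (m : Nat) (h : List Char) (t : List (List Char)) (ht : t.length ≤ 9) :
    (h :: t).mapIdx (pvStampC m) = (pvPfx m ++ h) :: t := by
  apply List.ext_getElem
  · simp
  · intro k h1 h2
    simp only [List.length_mapIdx, List.length_cons] at h1
    cases k with
    | zero => simp [pvStampC]
    | succ k =>
      have hk : (k + 1) % 10 ≠ 0 := by omega
      simp [pvStampC, hk]

-- Shifting the line index by 10 is shifting the minute by 1.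
lemma pvStamp_shift (m : Nat) (d : List (List Char)) :
    d.mapIdx (fun k l => pvStampC m (k + 10) l) = d.mapIdx (pvStampC (m + 1)) := by
  apply List.ext_getElem
  · simp
  · intro k h1 h2
    simp only [List.getElem_mapIdx, pvStampC]
    have h10 : (k + 10) % 10 = k % 10 := by omega
    have h10' : m + (k + 10) / 10 = m + 1 + k / 10 := by omega
    rw [h10, h10']

-- join of a cons with a nonempty tail.
lemma pvJoin_cons (sep x : List Char) (ys : List (List Char)) (hys : ys ≠ []) :
    PySem.Chars.join sep (x :: ys) = x ++ sep ++ PySem.Chars.join sep ys := by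
  have h := pvJoin_append sep [x] ys (by simp) hys
  simpa [PySem.Chars.join_singleton] using h

-- B's block list is never empty on a nonempty line list.
lemma pvBlocks_ne (m : Nat) (cs : List (List Char)) (hne : cs ≠ []) : pvBlocks m cs ≠ [] := by
  have hpos : 0 < cs.length := List.length_pos_of_ne_nil hne
  unfold pvBlocks
  simp only [ne_eq, List.map_eq_nil_iff, List.range_eq_nil]
  omega

-- Peeling the first 10-line block off B's block list.
lemma pvBlocks_step (m : Nat) (cs : List (List Char)) (hne : cs ≠ []) :
    pvBlocks m cs
      = (pvPfx m ++ PySem.Chars.join ['\n'] (cs.take 10)) :: pvBlocks (m + 1) (cs.drop 10) := by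
  have hpos : 0 < cs.length := List.length_pos_of_ne_nil hne
  have hq : (cs.length + 9) / 10 = ((cs.drop 10).length + 9) / 10 + 1 := by
    simp only [List.length_drop]; omega
  unfold pvBlocks
  rw [hq, List.range_succ_eq_map, List.map_cons]
  simp only [Nat.mul_zero, List.drop_zero, Nat.add_zero, List.map_map]
  congr 1
  apply List.map_congr_left
  intro j _
  simp only [Function.comp_apply, Nat.succ_eq_add_one]
  have h1 : m + (j + 1) = m + 1 + j := by omega
  have h2 : cs.drop (10 * (j + 1)) = (cs.drop 10).drop (10 * j) := by
    rw [List.drop_drop]; congr 1; omega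
  rw [h1, h2]

-- Core: per-line stamping and block-wise rendering join to the same text.
lemma pvCore :
    ∀ (n : Nat) (cs : List (List Char)), cs.length ≤ n → ∀ (m : Nat),
    PySem.Chars.join ['\n'] (cs.mapIdx (pvStampC m)) = PySem.Chars.join ['\n'] (pvBlocks m cs) := by
  intro n
  induction n with
  | zero =>
    intro cs hcs m
    have : cs = [] := List.eq_nil_of_length_eq_zero (by omega)
    subst this
    simp [pvBlocks]
  | succ n ih =>
    intro cs hcs m
    cases cs with
    | nil => simp [pvBlocks]
    | cons h t =>
      rw [pvBlocks_step m (h :: t) (by simp)]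
      by_cases hlen : t.length ≤ 9
      · -- a single block
        have hdrop : (h :: t).drop 10 = [] :=
          List.drop_eq_nil_of_le (by simp only [List.length_cons]; omega)
        have htake : (h :: t).take 10 = h :: t :=
          List.take_of_length_le (by simp only [List.length_cons]; omega)
        rw [pvStamp_block m h t hlen, hdrop, htake]
        have hb : pvBlocks (m + 1) ([] : List (List Char)) = [] := by simp [pvBlocks]
        rw [hb, PySem.Chars.join_singleton, pvJoin_prefix]
      · -- first block ++ the remaining blocks
        have hsplit : h :: t = (h :: t).take 10 ++ (h :: t).drop 10 :=
          (List.take_append_drop _ _).symm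
        have htake : (h :: t).take 10 = h :: t.take 9 := rfl
        conv_lhs => rw [hsplit]
        rw [List.mapIdx_append]
        have hl10 : (h :: t.take 9).length = 10 := by
          simp only [List.length_cons, List.length_take]; omega
        rw [htake, pvStamp_block m h (t.take 9) (by simp), hl10, pvStamp_shift m _]
        have hdne : (h :: t).drop 10 ≠ [] := by
          simp only [ne_eq, List.drop_eq_nil_iff, List.length_cons]; omega
        have hrest_ne : ((h :: t).drop 10).mapIdx (pvStampC (m + 1)) ≠ [] := by
          simp only [ne_eq, List.mapIdx_eq_nil_iff]; exact hdne
        rw [pvJoin_append ['\n'] _ _ (by simp) hrest_ne,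
          ih ((h :: t).drop 10) (by simp only [List.length_drop, List.length_cons] at hcs ⊢; omega) (m + 1),
          pvJoin_cons ['\n'] _ _ (pvBlocks_ne (m + 1) _ hdne),
          pvJoin_prefix]

-- A's mapIdx at char level.
lemma pvA_chars (ls : List String) :
    (PySem.Str.join "\n" (ls.mapIdx (fun k l => pvStampA (k : Int) l))).toList
      = PySem.Chars.join ['\n'] ((ls.map String.toList).mapIdx (pvStampC 0)) := by
  rw [PySem.Str.toList_join]
  congr 1
  apply List.ext_getElem
  · simp
  · intro k h1 h2
    simp only [List.getElem_map, List.getElem_mapIdx, pvStampA, pvStampC]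
    have hmod : PySem.Int.mod (k : Int) 10 = (k : Int) % 10 :=
      PySem.Int.mod_eq_emod_of_pos (by norm_num)
    have hdiv : PySem.Int.floordiv (k : Int) 10 = (k : Int) / 10 :=
      PySem.Int.floordiv_eq_ediv_of_pos (by norm_num)
    by_cases h : k % 10 = 0
    · have : (PySem.Int.mod (k : Int) 10 == 0) = true := by
        rw [hmod]; simp; omega
      rw [if_pos this, if_pos h]
      simp only [String.toList_append, PySem.Int.toList_toStr, pvPfx, Nat.zero_add]
      have : ((k / 10 : Nat) : Int) + 1 = PySem.Int.floordiv (k : Int) 10 + 1 := by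
        rw [hdiv]; omega
      rw [← this]
      simp
    · have : ¬ ((PySem.Int.mod (k : Int) 10 == 0) = true) := by
        rw [hmod]; simp; omega
      rw [if_neg this, if_neg h]

-- B's block list at char level.
lemma pvB_chars (ls : List String) :
    (PySem.Str.join "\n"
        ((PySem.List.pyRange 0 (PySem.Int.floordiv (PySem.List.len ls + 9) 10) 1).map
          (fun m => PySem.Int.toStr (m + 1) ++ ":00 " ++
            PySem.Str.join "\n" (PySem.List.slice ls (some (10 * m)) (some (10 * m + 10)))))).toList
      = PySem.Chars.join ['\n'] (pvBlocks 0 (ls.map String.toList)) := by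
  rw [PySem.Str.toList_join]
  congr 1
  have hN : PySem.Int.floordiv (PySem.List.len ls + 9) 10 = ((ls.length + 9) / 10 : Nat) := by
    rw [PySem.Int.floordiv_eq_ediv_of_pos (by norm_num), PySem.List.len_eq]
    omega
  rw [hN, PySem.List.pyRange_one]
  simp only [Int.sub_zero, Int.toNat_natCast, List.map_map, pvBlocks, List.length_map]
  apply List.ext_getElem
  · simp
  · intro j h1 h2
    simp only [List.getElem_map, List.getElem_range, Function.comp_apply]
    have hzero : (0 : Int) + (j : Int) = (j : Int) := by ring
    rw [hzero]
    have hsl : PySem.List.slice ls (some (10 * (j : Int))) (some (10 * (j : Int) + 10))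
        = (ls.drop (10 * j)).take 10 := by
      have e1 : (10 : Int) * (j : Int) = ((10 * j : Nat) : Int) := by push_cast; ring
      have e2 : (10 : Int) * (j : Int) + 10 = ((10 * j + 10 : Nat) : Int) := by push_cast; ring
      rw [e2, e1, PySem.List.slice_natCast]
      congr 1
      omega
    rw [hsl]
    simp only [String.toList_append, PySem.Int.toList_toStr, PySem.Str.toList_join, pvPfx,
      Nat.zero_add, List.map_take, List.map_drop]
    simp

-- ===== VERDICT (by name: the statement is the Claim_ definition above) =====
theorem modify_text_spec : Claim_equal_modify_text := by
  intro text _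
  unfold Spec_modify_text modify_text modify_text_alt
  simp only [pvA_list]
  apply String.toList_injective
  rw [pvA_chars, pvB_chars]
  exact pvCore ((((PySem.Str.split? (PySem.Str.replace (PySem.Str.replace text "*" "**") "#" "###") "\n").getD []).map String.toList).length) _ le_rfl 0
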